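-- pv_equiv track=rewrite | github.com/christianutn/Python | TP2/trabajo_practico_dos_final.py | es_invalida
-- ===== SOURCE A (Python) =====
-- def es_invalida(cuenta):
--     es_invalida = False
--     cant_arroba = 0
--     anterior = ''
--     for i in range(len(cuenta)):
--         if cuenta[i] == '@':
--             cant_arroba += 1
--
--         if cuenta[i] == '.' and anterior == '.':
--             es_invalida = True
--         anterior = cuenta[i]
--
--     if cuenta[0] == '@' or cuenta[-1] == '@' or cant_arroba != 1:
--             es_invalida = True
--
--     if cuenta[0] == '.' or cuenta[-1] == '.':
--             es_invalida = True
--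
--     return es_invalida
-- ===== SOURCE B (Python) =====
-- def es_invalida(cuenta):
--     return ('..' in cuenta
--             or cuenta.count('@') != 1
--             or cuenta[0] in '@.'
--             or cuenta[-1] in '@.')
-- ===== Notes on version B (the rewrite author's own statement) =====
-- stated objective: idiomatic
-- what changed: Replaces the explicit index loop with its anterior/cant_arroba state machine by one boolean expression over string builtins: a consecutive-dot substring test, an arroba count, and endpoint membership tests (the builtins run in C, so B is also measurably faster).
import Mathlib
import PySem

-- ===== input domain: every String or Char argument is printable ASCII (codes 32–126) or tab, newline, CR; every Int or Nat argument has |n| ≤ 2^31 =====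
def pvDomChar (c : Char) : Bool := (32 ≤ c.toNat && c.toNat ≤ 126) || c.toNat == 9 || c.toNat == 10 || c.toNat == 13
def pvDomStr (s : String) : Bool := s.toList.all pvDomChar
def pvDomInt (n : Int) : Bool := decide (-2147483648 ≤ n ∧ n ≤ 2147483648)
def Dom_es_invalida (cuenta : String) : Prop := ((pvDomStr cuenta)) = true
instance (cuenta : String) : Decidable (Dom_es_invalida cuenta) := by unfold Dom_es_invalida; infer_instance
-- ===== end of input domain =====

-- B replaces A's index loop and its anterior/cant_arroba state machine by one boolean
-- expression over string builtins (consecutive-dot substring test, arroba count, endpoint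
-- tests): idiomatic, and measurably faster by a constant factor (builtins run in C).

-- ===== PORT A =====
-- state: (es_invalida, cant_arroba, anterior); anterior = '' is modelled as `none`
def es_invalida (cuenta : String) : Bool :=
  let st : Bool × Int × Option Char :=
    cuenta.toList.foldl (fun st c =>
      let cant : Int := if c == '@' then st.2.1 + 1 else st.2.1
      let inv : Bool := if c == '.' && st.2.2 == some '.' then true else st.1
      (inv, cant, some c)) (false, 0, none)
  let first := PySem.Str.pyGet? cuenta 0
  let last := PySem.Str.pyGet? cuenta (-1)
  let inv1 : Bool :=
    if first == some '@' || last == some '@' || st.2.1 != 1 then true else st.1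
  let inv2 : Bool :=
    if first == some '.' || last == some '.' then true else inv1
  inv2

-- ===== PORT B =====
-- the `none` branches are unreachable under Pre_ (cuenta ≠ ""); in Python the earlier
-- disjunct `count('@') != 1` short-circuits before cuenta[0] on the empty string
def es_invalida_alt (cuenta : String) : Bool :=
  PySem.Str.isIn ".." cuenta
  || (PySem.Str.count cuenta "@" != 1)
  || (match PySem.Str.pyGet? cuenta 0 with
      | some c => c == '@' || c == '.'
      | none => false)
  || (match PySem.Str.pyGet? cuenta (-1) with
      | some c => c == '@' || c == '.'
      | none => false)

-- ===== PRECONDITION & SPEC =====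
-- A indexes cuenta[0] unconditionally, so it raises IndexError exactly on the empty string
def Pre_es_invalida (cuenta : String) : Prop := cuenta ≠ ""
instance (cuenta : String) : Decidable (Pre_es_invalida cuenta) := by unfold Pre_es_invalida; infer_instance
def pvWitness_es_invalida : String := "a@b.c"

def Spec_es_invalida (cuenta : String) (out : Bool) : Prop := out = es_invalida_alt cuenta
instance (cuenta : String) (out : Bool) : Decidable (Spec_es_invalida cuenta out) := by unfold Spec_es_invalida; infer_instance

-- ===== CLAIM (what is proved, stated in full; the proofs are below) =====
def Claim_equal_es_invalida : Prop := ∀ (cuenta : String), Dom_es_invalida cuenta → Pre_es_invalida cuenta → Spec_es_invalida cuenta (es_invalida cuenta)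

-- ===== LEMMAS AND PROOFS =====

-- "was the previous char (a) a dot followed by a dot?" — the loop's double-dot flag
def ddFrom (a : Option Char) : List Char → Bool
  | [] => false
  | c :: t => (c == '.' && a == some '.') || ddFrom (some c) t

theorem foldA_eq (l : List Char) (b : Bool) (k : Int) (a : Option Char) :
    (l.foldl (fun (st : Bool × Int × Option Char) c =>
      (if c == '.' && st.2.2 == some '.' then true else st.1,
       if c == '@' then st.2.1 + 1 else st.2.1, some c)) (b, k, a)).1 = (b || ddFrom a l) ∧
    (l.foldl (fun (st : Bool × Int × Option Char) c =>
      (if c == '.' && st.2.2 == some '.' then true else st.1,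
       if c == '@' then st.2.1 + 1 else st.2.1, some c)) (b, k, a)).2.1 = k + (l.count '@' : Int) := by
  induction l generalizing b k a with
  | nil => simp [ddFrom]
  | cons c t ih =>
    simp only [List.foldl_cons, ddFrom]
    refine ⟨?_, ?_⟩
    · rw [(ih _ _ _).1]
      cases hb : b <;> cases hx : (c == '.' && a == some '.') <;> simp [hb, hx]
    · rw [(ih _ _ _).2, List.count_cons]
      by_cases h : c = '@' <;> simp [h] <;> push_cast <;> ring

theorem ddFrom_iff (l : List Char) (a : Option Char) :
    ddFrom a l = true ↔ ((a = some '.' ∧ l.head? = some '.') ∨ ['.', '.'] <:+: l) := by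
  induction l generalizing a with
  | nil => simp [ddFrom]
  | cons c t ih =>
    simp only [ddFrom, Bool.or_eq_true, Bool.and_eq_true, beq_iff_eq, ih,
      List.infix_cons_iff, List.head?_cons, Option.some.injEq]
    constructor
    · rintro (⟨hc, ha⟩ | ⟨hc, hh⟩ | hi)
      · exact Or.inl ⟨ha, hc⟩
      · refine Or.inr (Or.inl ?_)
        subst hc
        rcases t with _ | ⟨d, t'⟩
        · simp at hh
        · simp at hh
          subst hh
          exact ⟨t', by simp⟩
      · exact Or.inr (Or.inr hi)
    · rintro (⟨ha, hc⟩ | hp | hi)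
      · exact Or.inl ⟨hc, ha⟩
      · rcases hp with ⟨r, hr⟩
        rcases t with _ | ⟨d, t'⟩
        · simp at hr
        · simp at hr
          exact Or.inr (Or.inl ⟨hr.1.symm, by simp [hr.2.1.symm]⟩)
      · exact Or.inr (Or.inr hi)

theorem countGo_singleton (v : Char) (fuel : Nat) (l : List Char) (acc : Nat)
    (h : l.length ≤ fuel) :
    PySem.Chars.count.go [v] fuel l acc = acc + l.count v := by
  induction fuel generalizing l acc with
  | zero =>
    have : l = [] := List.length_eq_zero_iff.mp (Nat.le_zero.mp h)
    subst this
    simp [PySem.Chars.count.go]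
  | succ n ih =>
    rcases l with _ | ⟨c, t⟩
    · simp [PySem.Chars.count.go]
    · rw [PySem.Chars.count.go]
      have ht : t.length ≤ n := by simpa using h
      by_cases hc : v = c
      · subst hc
        simp [List.isPrefixOf, ih _ _ ht, List.count_cons]
        omega
      · have : [v].isPrefixOf (c :: t) = false := by
          simp [List.isPrefixOf]
          exact hc
        simp [this, ih _ _ ht, List.count_cons]
        exact fun hx => hc hx.symm

theorem count_singleton (l : List Char) (v : Char) :
    PySem.Chars.count l [v] = l.count v := by
  simp [PySem.Chars.count]
  simpa using countGo_singleton v l.length l 0 le_rfl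

-- ===== VERDICT (by name: the statement is the Claim_ definition above) =====
theorem es_invalida_spec : Claim_equal_es_invalida := by
  intro cuenta _ hpre
  simp only [Spec_es_invalida, es_invalida, es_invalida_alt]
  rcases hs : cuenta.toList with _ | ⟨c0, rest⟩
  · exact absurd (String.toList_eq_nil_iff.mp hs) hpre
  · have hne : cuenta.toList ≠ [] := by rw [hs]; simp
    -- endpoints
    have hfirst : PySem.Str.pyGet? cuenta 0 = cuenta.toList[0]? := by
      simpa using PySem.Str.pyGet?_natCast cuenta 0
    have hlast : PySem.Str.pyGet? cuenta (-1) = cuenta.toList.getLast? := by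
      simp [PySem.Str.pyGet?_eq, PySem.List.pyGet?_neg_one]
    have h0 : cuenta.toList[0]? = some c0 := by rw [hs]; rfl
    obtain ⟨cl, hcl⟩ : ∃ cl, cuenta.toList.getLast? = some cl := by
      rcases h : cuenta.toList.getLast? with _ | cl
      · exact absurd (List.getLast?_eq_none_iff.mp h) hne
      · exact ⟨cl, rfl⟩
    -- fold components
    have hfold := foldA_eq cuenta.toList false 0 none
    -- substring test
    have hdd : ddFrom none cuenta.toList = PySem.Chars.isIn ['.', '.'] cuenta.toList := by
      rcases h : PySem.Chars.isIn ['.', '.'] cuenta.toList with _ | _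
      · rw [Bool.eq_false_iff, Ne, ddFrom_iff]
        rw [PySem.Chars.isIn_eq_false_iff] at h
        rintro (⟨ha, _⟩ | hi)
        · simp at ha
        · exact h hi
      · rw [ddFrom_iff]
        exact Or.inr ((PySem.Chars.isIn_iff_infix _ _).mp h)
    have hcnt : PySem.Str.count cuenta "@" = cuenta.toList.count '@' := by
      rw [PySem.Str.count_eq]
      exact count_singleton _ _
    rw [← hs] 
    rw [hfold.1, hfold.2, hfirst, hlast, h0, hcl, hcnt,
        show PySem.Str.isIn ".." cuenta = PySem.Chars.isIn ['.', '.'] cuenta.toList from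
          PySem.Str.isIn_eq ".." cuenta, ← hdd]
    -- now a pure boolean identity in dd, the count and the two endpoint characters
    generalize ddFrom none cuenta.toList = dd
    generalize hm : List.count '@' cuenta.toList = m
    have hz : (0 : Int) + (m : Int) = (m : Int) := by ring
    rw [hz]
    by_cases h0a : c0 = '@' <;> by_cases h0d : c0 = '.' <;>
      by_cases hla : cl = '@' <;> by_cases hld : cl = '.' <;>
      by_cases hn : m = 1 <;> cases dd <;>
      simp [h0a, h0d, hla, hld, hn]
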